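-- pv_equiv track=rewrite | github.com/georgkislinger/TrakEM2_export | trakEM_exporter.py | auto_mip_count
-- ===== SOURCE A (Python) =====
-- import math
--
-- def auto_mip_count(width, height):
--     max_dim = max(int(width), int(height))
--     count = 0
--     w = int(width)
--     h = int(height)
--     while max_dim >= 512:
--         w = max(1, int(math.ceil(w / 2.0)))
--         h = max(1, int(math.ceil(h / 2.0)))
--         count += 1
--         max_dim = max(w, h)
--     return count
-- ===== SOURCE B (Python) =====
-- def auto_mip_count(width, height):
--     M = max(int(width), int(height))
--     if M < 512:
--         return 0
--     q = -(-M // 511)          # ceil(M / 511)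
--     return (q - 1).bit_length()  # smallest k with 2**k >= q
-- ===== Notes on version B (the rewrite author's own statement) =====
-- stated objective: simpler
-- what changed: Replaces the halve-both-dimensions loop with a closed form on the larger dimension: count = bit_length(ceil(max/511) - 1), since k ceiling-halvings of M give ceil(M/2^k).
import Mathlib
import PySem

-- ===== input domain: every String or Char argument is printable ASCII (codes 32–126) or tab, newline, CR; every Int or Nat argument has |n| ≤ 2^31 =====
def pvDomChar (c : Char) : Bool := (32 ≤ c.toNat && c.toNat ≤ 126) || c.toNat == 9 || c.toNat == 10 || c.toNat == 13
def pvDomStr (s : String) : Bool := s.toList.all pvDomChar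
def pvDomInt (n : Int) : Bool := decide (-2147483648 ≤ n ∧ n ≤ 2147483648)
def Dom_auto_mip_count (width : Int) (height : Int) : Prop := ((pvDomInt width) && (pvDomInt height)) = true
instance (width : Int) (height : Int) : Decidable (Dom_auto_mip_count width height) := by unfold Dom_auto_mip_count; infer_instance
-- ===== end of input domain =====

-- B replaces A's halve-both-dimensions loop with a closed form on the larger dimension (objective: simpler).

-- ===== PORT A =====
-- max(1, int(math.ceil(x / 2.0))) : exact as integer ceiling division, since |x| ≤ 2^31 is
-- exactly representable as a double and x/2.0 is exact; ceil(x/2) = -((-x)/2) with floor division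
-- (Lean's `/` on Int is ediv, which is floor division for the positive divisor 2).
def amcHalf (x : Int) : Int := max 1 (-((-x) / 2))

-- half of the termination argument, kept as small named lemmas the loop cites
theorem amcHalf_lt (x M : Int) (hx : x ≤ M) (hM : 2 ≤ M) : amcHalf x < M := by
  have hmono : (-M) / 2 ≤ (-x) / 2 := Int.ediv_le_ediv two_pos (neg_le_neg hx)
  have h1 : -M + 1 ≤ -M / 2 := (Int.le_ediv_iff_mul_le two_pos).mpr (by linarith)
  exact max_lt (by linarith) (by linarith)

theorem amcLoop_dec (w h : Int) (hc : 512 ≤ max w h) :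
    (max (amcHalf w) (amcHalf h)).toNat < (max w h).toNat := by
  have h2 : (2 : Int) ≤ max w h := le_trans (by norm_num) hc
  refine (Int.toNat_lt_toNat (lt_of_lt_of_le two_pos h2)).mpr ?_
  exact max_lt (amcHalf_lt w _ (le_max_left w h) h2) (amcHalf_lt h _ (le_max_right w h) h2)

-- the while loop, carrying (w, h, count); the guard max w h is Python's max_dim
def amcLoop (w h count : Int) : Int :=
  if hc : 512 ≤ max w h then
    amcLoop (amcHalf w) (amcHalf h) (count + 1)
  else count
termination_by (max w h).toNat
decreasing_by exact amcLoop_dec w h hc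

def auto_mip_count (width : Int) (height : Int) : Int := amcLoop width height 0

-- ===== PORT B =====
-- Python's int.bit_length for nonnegative ints
def amcBitLength (n : Nat) : Nat :=
  if h : n = 0 then 0 else amcBitLength (n / 2) + 1
decreasing_by exact Nat.div_lt_self (Nat.pos_of_ne_zero h) Nat.one_lt_two

def auto_mip_count_alt (width : Int) (height : Int) : Int :=
  let M := max width height
  if M < 512 then 0
  else
    let q := -((-M) / 511)    -- ceil(M / 511); Lean Int `/` = floor division for divisor 511
    (amcBitLength (q - 1).toNat : Int)  -- q - 1 ≥ 1 here, so toNat is faithful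

-- ===== PRECONDITION & SPEC =====
def Spec_auto_mip_count (width : Int) (height : Int) (out : Int) : Prop := out = auto_mip_count_alt width height
instance (width : Int) (height : Int) (out : Int) : Decidable (Spec_auto_mip_count width height out) := by unfold Spec_auto_mip_count; infer_instance

-- ===== CLAIM (what is proved, stated in full; the proofs are below) =====
def Claim_equal_auto_mip_count : Prop := ∀ (width : Int) (height : Int), Dom_auto_mip_count width height → Spec_auto_mip_count width height (auto_mip_count width height)

-- ===== LEMMAS AND PROOFS =====

theorem amcBitLength_pos (n : Nat) (hn : n ≠ 0) :
    amcBitLength n = amcBitLength (n / 2) + 1 := by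
  rw [amcBitLength]; simp [hn]

-- closed form F(M) on the larger dimension, as auto_mip_count_alt computes it
def amcF (M : Int) : Int :=
  if M < 512 then 0 else (amcBitLength ((-((-M) / 511)) - 1).toNat : Int)

-- the key step: one ceiling-halving of M costs exactly one in the closed form
theorem amcF_step (M : Int) (hM : 512 ≤ M) : amcF M = amcF (-((-M) / 2)) + 1 := by
  set M' : Int := -((-M) / 2) with hM'
  by_cases h : M ≤ 1022
  · -- M' ≤ 511, so F(M') = 0; q = ceil(M/511) = 2 and bit_length 1 = 1
    have hq : -((-M) / 511) = 2 := by omega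
    have hlt : M' < 512 := by omega
    simp only [amcF, hq, hM']
    rw [if_neg (by omega), if_pos hlt]
    have h0 : amcBitLength 0 = 0 := by rw [amcBitLength]; simp
    have h1 : amcBitLength 1 = 1 := by
      rw [amcBitLength_pos 1 (by omega)]; norm_num [h0]
    norm_num [h1]
  · -- M ≥ 1023: q' - 1 = (q - 1) / 2 and bit_length recursion
    have hM'512 : 512 ≤ M' := by omega
    set q : Int := -((-M) / 511) with hqdef
    set q' : Int := -((-M') / 511) with hq'def
    have hq3 : 3 ≤ q := by omega
    have hq' : q' - 1 = (q - 1) / 2 := by omega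
    have hnat : (q' - 1).toNat = (q - 1).toNat / 2 := by omega
    simp only [amcF, ← hqdef, ← hq'def]
    rw [if_neg (by omega), if_neg (by omega), hnat,
      amcBitLength_pos (q - 1).toNat (by omega)]
    push_cast
    ring

-- the loop equals count + F(max w h)
theorem amcLoop_eq (w h count : Int) : amcLoop w h count = count + amcF (max w h) := by
  fun_induction amcLoop w h count with
  | case1 w h count hc ih =>
    have hmax : max (amcHalf w) (amcHalf h) = -((- max w h) / 2) := by
      simp only [amcHalf]; omega
    rw [ih, hmax, amcF_step (max w h) hc]
    ring
  | case2 w h count hc =>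
    rw [amcF, if_pos (by omega)]
    ring

-- ===== VERDICT (by name: the statement is the Claim_ definition above) =====
theorem auto_mip_count_spec : Claim_equal_auto_mip_count := by
  intro width height _
  show auto_mip_count width height = auto_mip_count_alt width height
  rw [auto_mip_count, amcLoop_eq]
  simp only [auto_mip_count_alt, amcF]
  split_ifs <;> ring
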